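-- pv_equiv track=rewrite | github.com/scawful/Oracle-of-Secrets | scripts/campaign/pathfinder.py | path_to_inputs
-- ===== SOURCE A (Python) =====
-- from typing import List, Tuple, Optional, Set, Dict
--
-- def path_to_inputs(
--
--     path: List[Tuple[int, int]],
--     frames_per_tile: int = 8
-- ) -> List[Tuple[str, int]]:
--     """Convert a tile path to input commands.
--
--     Args:
--         path: List of tile coordinates
--         frames_per_tile: Frames to hold direction per tile
--
--     Returns:
--         List of (direction, frames) tuples
--     """
--     if len(path) < 2:
--         return []
--
--     inputs = []
--     for i in range(1, len(path)):
--         prev = path[i - 1]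
--         curr = path[i]
--
--         dx = curr[0] - prev[0]
--         dy = curr[1] - prev[1]
--
--         if dx > 0:
--             direction = "RIGHT"
--         elif dx < 0:
--             direction = "LEFT"
--         elif dy > 0:
--             direction = "DOWN"
--         elif dy < 0:
--             direction = "UP"
--         else:
--             continue
--
--         # Merge consecutive same-direction moves
--         if inputs and inputs[-1][0] == direction:
--             inputs[-1] = (direction, inputs[-1][1] + frames_per_tile)
--         else:
--             inputs.append((direction, frames_per_tile))
--
--     return inputs
-- ===== SOURCE B (Python) =====
-- from typing import List, Tuple
--
--
-- def path_to_inputs(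
--     path: List[Tuple[int, int]],
--     frames_per_tile: int = 8
-- ) -> List[Tuple[str, int]]:
--     """Convert a tile path to input commands.
--
--     Two-pointer run scanner: the outer loop finds the direction of the next
--     real move, the inner loop advances the cursor across the whole maximal run
--     of that direction (zero moves never break a run, matching the merge
--     semantics), and one command is emitted per run with frames computed by a
--     single multiplication.
--     """
--     if len(path) < 2:
--         return []
--
--     steps = list(zip(path, path[1:]))
--
--     def classify(step):
--         (px, py), (cx, cy) = step
--         dx = cx - px
--         dy = cy - py
--         if dx > 0:
--             return "RIGHT"
--         if dx < 0:
--             return "LEFT"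
--         if dy > 0:
--             return "DOWN"
--         if dy < 0:
--             return "UP"
--         return None
--
--     out = []
--     i = 0
--     n = len(steps)
--     while i < n:
--         d = classify(steps[i])
--         if d is None:
--             i += 1
--             continue
--         k = 0
--         while i < n:
--             c = classify(steps[i])
--             if c is None:
--                 i += 1
--             elif c == d:
--                 k += 1
--                 i += 1
--             else:
--                 break
--         out.append((d, frames_per_tile * k))
--     return out
-- ===== Notes on version B (the rewrite author's own statement) =====
-- stated objective: alternative
-- what changed: Replaced A's single pass that merges into the mutable last output entry by a two-pointer run scanner: an outer loop finds the next real move's direction and an inner loop advances the cursor across the whole maximal run (zero moves never break a run), emitting one command per run with frames computed by one multiplication instead of repeated additions to the last entry.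
import Mathlib
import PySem

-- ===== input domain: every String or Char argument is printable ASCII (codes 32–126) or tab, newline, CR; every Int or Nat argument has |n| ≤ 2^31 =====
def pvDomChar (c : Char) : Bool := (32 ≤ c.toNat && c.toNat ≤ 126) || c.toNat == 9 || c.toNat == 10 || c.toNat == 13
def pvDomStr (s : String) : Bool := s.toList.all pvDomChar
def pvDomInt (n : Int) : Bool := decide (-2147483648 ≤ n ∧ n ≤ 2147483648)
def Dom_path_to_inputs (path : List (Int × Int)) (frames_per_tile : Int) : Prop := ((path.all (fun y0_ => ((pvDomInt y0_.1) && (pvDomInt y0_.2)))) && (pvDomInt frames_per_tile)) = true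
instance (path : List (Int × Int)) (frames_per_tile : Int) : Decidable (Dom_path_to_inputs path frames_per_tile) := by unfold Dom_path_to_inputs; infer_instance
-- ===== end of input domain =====

-- B replaces A's incremental merge-into-last-entry pass by a two-pointer run scanner
-- (outer loop per run, inner loop across the run, frames by one multiplication);
-- both programs are total and mutate nothing; proved to return equal values on every input.

-- ===== PORT A =====
-- A's in-loop merge: bump the last entry in place if it has the same direction, else append.
def pvMergeA (inputs : List (String × Int)) (d : String) (fpt : Int) : List (String × Int) :=
  match inputs.getLast? with
  | some last => if last.1 = d then inputs.dropLast ++ [(d, last.2 + fpt)] else inputs ++ [(d, fpt)]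
  | none => inputs ++ [(d, fpt)]

-- A's loop body: dx/dy branch chain in A's order, 'continue' when both are zero.
def pvStepA (fpt : Int) (inputs : List (String × Int)) (prev curr : Int × Int) : List (String × Int) :=
  let dx := curr.1 - prev.1
  let dy := curr.2 - prev.2
  if dx > 0 then pvMergeA inputs "RIGHT" fpt
  else if dx < 0 then pvMergeA inputs "LEFT" fpt
  else if dy > 0 then pvMergeA inputs "DOWN" fpt
  else if dy < 0 then pvMergeA inputs "UP" fpt
  else inputs

-- A's 'for i in range(1, len(path))' walking path[i-1], path[i] with accumulator 'inputs'.
def pvLoopA (fpt : Int) (inputs : List (String × Int)) (prev : Int × Int) :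
    List (Int × Int) → List (String × Int)
  | [] => inputs
  | curr :: rest => pvLoopA fpt (pvStepA fpt inputs prev curr) curr rest

def path_to_inputs (path : List (Int × Int)) (frames_per_tile : Int) : List (String × Int) :=
  if path.length < 2 then []
  else match path with
    | [] => []
    | p :: ps => pvLoopA frames_per_tile [] p ps

-- ===== PORT B =====
-- B's classify(step): same branch order, Option result (none = zero move).
def pvClassifyB (s : (Int × Int) × (Int × Int)) : Option String :=
  let dx := s.2.1 - s.1.1
  let dy := s.2.2 - s.1.2
  if dx > 0 then some "RIGHT"
  else if dx < 0 then some "LEFT"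
  else if dy > 0 then some "DOWN"
  else if dy < 0 then some "UP"
  else none

-- B's inner while loop: advance the cursor across the current run of direction d
-- (zero moves are skipped, a different direction stops), counting the run's real moves in k.
def pvRunB (d : String) (k : Int) : List ((Int × Int) × (Int × Int)) →
    Int × List ((Int × Int) × (Int × Int))
  | [] => (k, [])
  | s :: rest =>
    match pvClassifyB s with
    | none => pvRunB d k rest
    | some c => if c = d then pvRunB d (k + 1) rest else (k, s :: rest)

-- termination lemma for B's outer loop: the inner loop never moves the cursor backwards.
theorem pvRunB_len (d : String) : ∀ (l : List ((Int × Int) × (Int × Int))) (k : Int),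
    (pvRunB d k l).2.length ≤ l.length := by
  intro l
  induction l with
  | nil => intro k; simp [pvRunB]
  | cons s rest ih =>
      intro k
      simp only [pvRunB]
      cases pvClassifyB s with
      | none => exact le_trans (ih k) (Nat.le_succ _)
      | some c =>
          by_cases h : c = d
          · simp only [h, if_true]
            exact le_trans (ih (k + 1)) (Nat.le_succ _)
          · simp [h]

-- B's outer while loop over the step list: find the next real move's direction, eat its run.
def pvOuterB (fpt : Int) : List ((Int × Int) × (Int × Int)) → List (String × Int)
  | [] => []
  | s :: rest =>
    match pvClassifyB s with
    | none => pvOuterB fpt rest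
    | some d =>
        let kr := pvRunB d 1 rest
        (d, fpt * kr.1) :: pvOuterB fpt kr.2
  termination_by l => l.length
  decreasing_by
    · simp only [List.length_cons]; exact Nat.lt_succ_of_le (Nat.le_refl _)
    · simp only [List.length_cons]; exact Nat.lt_succ_of_le (pvRunB_len _ _ _)

def path_to_inputs_alt (path : List (Int × Int)) (frames_per_tile : Int) : List (String × Int) :=
  if path.length < 2 then []
  else pvOuterB frames_per_tile (path.zip (path.drop 1))

-- ===== PRECONDITION & SPEC =====
def Spec_path_to_inputs (path : List (Int × Int)) (frames_per_tile : Int) (out : List (String × Int)) : Prop := out = path_to_inputs_alt path frames_per_tile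
instance (path : List (Int × Int)) (frames_per_tile : Int) (out : List (String × Int)) : Decidable (Spec_path_to_inputs path frames_per_tile out) := by unfold Spec_path_to_inputs; infer_instance

-- ===== CLAIM (what is proved, stated in full; the proofs are below) =====
def Claim_equal_path_to_inputs : Prop := ∀ (path : List (Int × Int)) (frames_per_tile : Int), Dom_path_to_inputs path frames_per_tile → Spec_path_to_inputs path frames_per_tile (path_to_inputs path frames_per_tile)

-- ===== LEMMAS AND PROOFS =====

-- A's step is: classify, skip on none, merge on some.
theorem pvStepA_eq_classify (fpt : Int) (inputs : List (String × Int)) (prev curr : Int × Int) :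
    pvStepA fpt inputs prev curr =
      match pvClassifyB (prev, curr) with
      | none => inputs
      | some d => pvMergeA inputs d fpt := by
  unfold pvStepA pvClassifyB
  by_cases h1 : prev.1 < curr.1 <;> by_cases h2 : curr.1 < prev.1 <;>
    by_cases h3 : prev.2 < curr.2 <;> by_cases h4 : curr.2 < prev.2 <;>
    simp [sub_neg, h1, h2, h3, h4]

-- A's loop = fold of merge over the filtered direction list of consecutive pairs.
theorem pvLoopA_eq_foldl (fpt : Int) :
    ∀ (rest : List (Int × Int)) (prev : Int × Int) (inputs : List (String × Int)),
    pvLoopA fpt inputs prev rest =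
      List.foldl (fun inp d => pvMergeA inp d fpt) inputs
        (((prev :: rest).zip rest).filterMap pvClassifyB) := by
  intro rest
  induction rest with
  | nil => intro prev inputs; rfl
  | cons curr rs ih =>
      intro prev inputs
      simp only [pvLoopA, List.zip_cons_cons, List.filterMap_cons, pvStepA_eq_classify]
      cases h : pvClassifyB (prev, curr) with
      | none => simp [ih]
      | some d => simp [ih]

-- reference run-length grouping of a direction list (proof-side only).
def pvGroupRef (fpt : Int) : List String → List (String × Int)
  | [] => []
  | d :: rest =>
      (d, fpt * (1 + (rest.takeWhile (· = d)).length)) :: pvGroupRef fpt (rest.dropWhile (· = d))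
  termination_by l => l.length
  decreasing_by
    simp only [List.length_cons]
    exact Nat.lt_succ_of_le (List.length_dropWhile_le _ _)

-- A's fold with a nonempty accumulator, written with the last entry explicit.
def pvGroupWith (fpt : Int) (d0 : String) (n0 : Int) : List String → List (String × Int)
  | [] => [(d0, n0)]
  | d :: rest => if d0 = d then pvGroupWith fpt d0 (n0 + fpt) rest
                 else (d0, n0) :: pvGroupWith fpt d fpt rest

theorem foldl_merge_groupWith (fpt : Int) :
    ∀ (dirs : List String) (front : List (String × Int)) (d0 : String) (n0 : Int),
    List.foldl (fun inp d => pvMergeA inp d fpt) (front ++ [(d0, n0)]) dirs =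
      front ++ pvGroupWith fpt d0 n0 dirs := by
  intro dirs
  induction dirs with
  | nil => intro front d0 n0; rfl
  | cons d rest ih =>
      intro front d0 n0
      have hstep : pvMergeA (front ++ [(d0, n0)]) d fpt =
          if d0 = d then front ++ [(d, n0 + fpt)] else front ++ [(d0, n0)] ++ [(d, fpt)] := by
        unfold pvMergeA
        rw [List.getLast?_concat, List.dropLast_concat]
      rw [List.foldl_cons, hstep]
      by_cases h : d0 = d
      · rw [if_pos h, ih front d (n0 + fpt)]
        subst h
        simp [pvGroupWith]
      · rw [if_neg h, ih (front ++ [(d0, n0)]) d fpt]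
        simp [pvGroupWith, h]

theorem groupWith_eq_groupRef (fpt : Int) :
    ∀ (dirs : List String) (d0 : String) (n0 : Int),
    pvGroupWith fpt d0 n0 dirs =
      (d0, n0 + fpt * ((dirs.takeWhile (· = d0)).length : Int)) ::
        pvGroupRef fpt (dirs.dropWhile (· = d0)) := by
  intro dirs
  induction dirs with
  | nil => intro d0 n0; simp [pvGroupWith, pvGroupRef]
  | cons d rest ih =>
      intro d0 n0
      by_cases h : d = d0
      · subst h
        rw [show pvGroupWith fpt d n0 (d :: rest) = pvGroupWith fpt d (n0 + fpt) rest from by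
          simp [pvGroupWith]]
        rw [ih d (n0 + fpt)]
        simp only [List.takeWhile_cons, List.dropWhile_cons, decide_true, if_true,
          List.length_cons]
        simp only [List.cons.injEq, Prod.mk.injEq, true_and, and_true]
        push_cast
        ring
      · have h' : ¬ (d0 = d) := fun hc => h hc.symm
        rw [show pvGroupWith fpt d0 n0 (d :: rest) = (d0, n0) :: pvGroupWith fpt d fpt rest from by
          simp [pvGroupWith, h']]
        rw [ih d fpt]
        simp only [List.takeWhile_cons, List.dropWhile_cons, h, decide_false,
          Bool.false_eq_true, if_false, List.length_nil, Nat.cast_zero, mul_zero, add_zero]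
        rw [show pvGroupRef fpt (d :: rest) =
          (d, fpt * (1 + (rest.takeWhile (· = d)).length)) ::
            pvGroupRef fpt (rest.dropWhile (· = d)) from by rw [pvGroupRef]]
        simp only [List.cons.injEq, Prod.mk.injEq, true_and, and_true]
        ring

-- merge-fold from the empty accumulator = run-length grouping.
theorem foldl_merge_eq_groupRef (fpt : Int) (dirs : List String) :
    List.foldl (fun inp d => pvMergeA inp d fpt) [] dirs = pvGroupRef fpt dirs := by
  cases dirs with
  | nil => simp [pvGroupRef]
  | cons d rest =>
      have h0 : pvMergeA [] d fpt = [(d, fpt)] := rfl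
      simp only [List.foldl_cons, h0]
      have := foldl_merge_groupWith fpt rest [] d fpt
      simp only [List.nil_append] at this
      rw [this, groupWith_eq_groupRef]
      rw [show pvGroupRef fpt (d :: rest) =
        (d, fpt * (1 + (rest.takeWhile (· = d)).length)) ::
          pvGroupRef fpt (rest.dropWhile (· = d)) from by rw [pvGroupRef]]
      simp only [List.cons.injEq, Prod.mk.injEq, true_and, and_true]
      ring

-- B's inner loop computes the filtered run length and leaves a suffix whose filtered
-- directions are the dropWhile of the filtered input.
theorem pvRunB_spec (d : String) :
    ∀ (l : List ((Int × Int) × (Int × Int))) (k : Int),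
    (pvRunB d k l).1 = k + (((l.filterMap pvClassifyB).takeWhile (· = d)).length : Int) ∧
    (pvRunB d k l).2.filterMap pvClassifyB = (l.filterMap pvClassifyB).dropWhile (· = d) := by
  intro l
  induction l with
  | nil => intro k; simp [pvRunB]
  | cons s rest ih =>
      intro k
      simp only [pvRunB, List.filterMap_cons]
      cases h : pvClassifyB s with
      | none => exact ih k
      | some c =>
          by_cases hc : c = d
          · subst hc
            simp only [if_pos rfl, List.takeWhile_cons, List.dropWhile_cons, decide_true,
              if_true, List.length_cons]
            refine ⟨?_, (ih (k + 1)).2⟩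
            rw [(ih (k + 1)).1]
            push_cast
            ring
          · simp only [if_neg hc, List.takeWhile_cons, List.dropWhile_cons, hc, decide_false,
              Bool.false_eq_true, if_false, List.length_nil, Nat.cast_zero, add_zero]
            exact ⟨by simp, by simp [h]⟩

-- B's outer loop = run-length grouping of the filtered direction list.
theorem pvOuterB_eq_groupRef (fpt : Int) :
    ∀ (n : Nat) (l : List ((Int × Int) × (Int × Int))), l.length ≤ n →
    pvOuterB fpt l = pvGroupRef fpt (l.filterMap pvClassifyB) := by
  intro n
  induction n with
  | zero =>
      intro l hl
      have : l = [] := List.length_eq_zero_iff.mp (Nat.le_zero.mp hl)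
      subst this
      simp [pvOuterB, pvGroupRef]
  | succ n ih =>
      intro l hl
      cases l with
      | nil => simp [pvOuterB, pvGroupRef]
      | cons s rest =>
          cases h : pvClassifyB s with
          | none =>
              have hstep : pvOuterB fpt (s :: rest) = pvOuterB fpt rest := by
                rw [pvOuterB.eq_def]; simp only [h]
              rw [hstep, List.filterMap_cons, h]
              exact ih rest (Nat.le_of_succ_le_succ hl)
          | some d =>
              have hrun := pvRunB_spec d rest 1
              have hlen : (pvRunB d 1 rest).2.length ≤ n :=
                le_trans (pvRunB_len d rest 1) (Nat.le_of_succ_le_succ hl)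
              have hstep : pvOuterB fpt (s :: rest) =
                  (d, fpt * (pvRunB d 1 rest).1) :: pvOuterB fpt (pvRunB d 1 rest).2 := by
                rw [pvOuterB.eq_def]; simp only [h]
              rw [hstep, List.filterMap_cons, h,
                show pvGroupRef fpt (d :: rest.filterMap pvClassifyB) =
                  (d, fpt * (1 + ((rest.filterMap pvClassifyB).takeWhile (· = d)).length)) ::
                    pvGroupRef fpt ((rest.filterMap pvClassifyB).dropWhile (· = d)) from by
                  rw [pvGroupRef],
                ih (pvRunB d 1 rest).2 hlen, hrun.2, hrun.1]

-- ===== VERDICT (by name: the statement is the Claim_ definition above) =====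
theorem path_to_inputs_spec : Claim_equal_path_to_inputs := by
  intro path fpt _
  unfold Spec_path_to_inputs path_to_inputs path_to_inputs_alt
  by_cases hlen : path.length < 2
  · simp [hlen]
  · simp only [hlen, if_false]
    match path with
    | [] => simp at hlen
    | p :: ps =>
        simp only []
        rw [pvLoopA_eq_foldl]
        have hz : (p :: ps).zip ((p :: ps).drop 1) = (p :: ps).zip ps := by simp
        rw [hz, foldl_merge_eq_groupRef, pvOuterB_eq_groupRef fpt ((p :: ps).zip ps).length _ le_rfl]
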